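-- pv_equiv track=rewrite | github.com/Disi77/Advent-of-Code | AdventOfCode2020/day24/day24_part2.py | get_coordinates_of_tile
-- ===== SOURCE A (Python) =====
-- def get_coordinates_of_tile(line):
--     r"""     if A row is even
--        / \ / \
--       | * | * |       (-1, 1)     (0, 1)
--      / \ / \ / \
--     | * | A | * |   (-1, 0)  (0, 0)  (1, 0)
--      \ / \ / \ /
--       | * | * |       (-1, -1)    (0, -1)
--        \ / \ /
--
--               if B row is odd
--        / \ / \
--       | * | * |       (0, 1)     (1, 1)
--      / \ / \ / \
--     | * | B | * |   (-1, 0)  (0, 0)  (1, 0)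
--      \ / \ / \ /
--       | * | * |       (0, -1)    (1, -1)
--        \ / \ /
--     """
--
--     line = line.strip()
--     x = y = index = 0
--     while index < len(line):
--         dir = line[index]
--         if dir not in DIR_ROW_EVEN:
--             dir = line[index:index+2]
--             index += 1
--         index += 1
--         if y % 2 == 0:
--             x += DIR_ROW_EVEN[dir][0]
--             y += DIR_ROW_EVEN[dir][1]
--         else:
--             x += DIR_ROW_ODD[dir][0]
--             y += DIR_ROW_ODD[dir][1]
--     return (x, y)
--
-- DIR_ROW_EVEN = {"nw": (-1, 1),
--                 "w": (-1, 0),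
--                 "sw": (-1, -1),
--                 "ne": (0, 1),
--                 "e": (1, 0),
--                 "se": (0, -1)}
--
-- DIR_ROW_ODD = {"nw": (0, 1),
--                "w": (-1, 0),
--                "sw": (0, -1),
--                "ne": (1, 1),
--                "e": (1, 0),
--                "se": (1, -1)}
-- ===== SOURCE B (Python) =====
-- AXIAL = {"e": (1, 0), "w": (-1, 0), "ne": (0, 1), "sw": (0, -1),
--          "nw": (-1, 1), "se": (1, -1)}
--
-- def get_coordinates_of_tile(line):
--     # Two phases: tokenize, then sum parity-free axial vectors; convert once at the end.
--     line = line.strip()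
--     tokens = []
--     i = 0
--     while i < len(line):
--         if line[i] in ("e", "w"):
--             tokens.append(line[i])
--             i += 1
--         else:
--             tokens.append(line[i:i+2])
--             i += 2
--     q = sum(AXIAL[t][0] for t in tokens)
--     r = sum(AXIAL[t][1] for t in tokens)
--     return (q + (r - r % 2) // 2, r)
-- ===== Notes on version B (the rewrite author's own statement) =====
-- stated objective: simpler
-- what changed: B tokenizes the line once, sums parity-free axial direction vectors (no y%2 branch per step), and converts the axial total to A's offset layout with one closed-form formula at the end.
import Mathlib
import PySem

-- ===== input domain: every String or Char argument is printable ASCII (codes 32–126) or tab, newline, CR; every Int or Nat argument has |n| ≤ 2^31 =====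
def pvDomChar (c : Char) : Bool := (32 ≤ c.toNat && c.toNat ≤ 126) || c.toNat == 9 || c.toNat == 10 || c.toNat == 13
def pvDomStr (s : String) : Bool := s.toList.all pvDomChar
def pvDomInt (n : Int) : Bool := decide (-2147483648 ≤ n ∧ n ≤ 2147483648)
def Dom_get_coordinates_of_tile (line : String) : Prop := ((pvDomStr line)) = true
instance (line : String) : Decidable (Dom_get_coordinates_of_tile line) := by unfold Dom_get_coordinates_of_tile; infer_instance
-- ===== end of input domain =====

-- B replaces A's parity-branched per-step offset bookkeeping by a tokenize-then-sum of
-- parity-free axial vectors with one closed-form conversion at the end (objective: simpler).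

-- ===== PORT A =====
def pvDirRowEven : PySem.Dict String (Int × Int) :=
  PySem.Dict.ofList [("nw", (-1, 1)), ("w", (-1, 0)), ("sw", (-1, -1)),
                     ("ne", (0, 1)), ("e", (1, 0)), ("se", (0, -1))]

def pvDirRowOdd : PySem.Dict String (Int × Int) :=
  PySem.Dict.ofList [("nw", (0, 1)), ("w", (-1, 0)), ("sw", (0, -1)),
                     ("ne", (1, 1)), ("e", (1, 0)), ("se", (1, -1))]

-- A's while loop over the stripped line; `none` = Python's KeyError (excluded by Pre_).
def pvGoA : List Char → Int → Int → Option (Int × Int)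
  | [], x, y => some (x, y)
  | c :: rest, x, y =>
    if pvDirRowEven.contains (String.mk [c]) then
      match (if 2 ∣ y then pvDirRowEven.get? (String.mk [c])
             else pvDirRowOdd.get? (String.mk [c])) with
      | some d => pvGoA rest (x + d.1) (y + d.2)
      | none => none
    else
      match (if 2 ∣ y then pvDirRowEven.get? (String.mk (c :: rest.take 1))
             else pvDirRowOdd.get? (String.mk (c :: rest.take 1))) with
      | some d => pvGoA (rest.drop 1) (x + d.1) (y + d.2)
      | none => none
  termination_by l => l.length
  decreasing_by all_goals (simp only [List.length_drop, List.length_cons]; omega)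

def get_coordinates_of_tile (line : String) : Int × Int :=
  (pvGoA (PySem.Str.strip line).toList 0 0).getD (0, 0)

-- ===== PORT B =====
def pvAxial : PySem.Dict String (Int × Int) :=
  PySem.Dict.ofList [("e", (1, 0)), ("w", (-1, 0)), ("ne", (0, 1)),
                     ("sw", (0, -1)), ("nw", (-1, 1)), ("se", (1, -1))]

-- Source B phase 1: cut the stripped line into direction tokens.
def pvTokenize : List Char → List String
  | [] => []
  | c :: rest =>
    if c = 'e' ∨ c = 'w' then String.mk [c] :: pvTokenize rest
    else String.mk (c :: rest.take 1) :: pvTokenize (rest.drop 1)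
  termination_by l => l.length
  decreasing_by all_goals (simp only [List.length_drop, List.length_cons]; omega)

-- Source B's AXIAL[t][0] / AXIAL[t][1]; the default is unreachable inside Pre_ (KeyError otherwise).
def pvAxQ (t : String) : Int := ((pvAxial.get? t).getD (0, 0)).1
def pvAxR (t : String) : Int := ((pvAxial.get? t).getD (0, 0)).2

def get_coordinates_of_tile_alt (line : String) : Int × Int :=
  let tokens := pvTokenize (PySem.Str.strip line).toList
  let q := (tokens.map pvAxQ).sum
  let r := (tokens.map pvAxR).sum
  (q + PySem.Int.floordiv (r - PySem.Int.mod r 2) 2, r)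

-- ===== PRECONDITION & SPEC =====
-- Pre_ excludes exactly the inputs on which A raises KeyError: the stripped line must be a
-- sequence of the six direction tokens e/w/ne/nw/se/sw.
def pvValidDirs : List Char → Bool
  | [] => true
  | 'e' :: rest => pvValidDirs rest
  | 'w' :: rest => pvValidDirs rest
  | 'n' :: 'e' :: rest => pvValidDirs rest
  | 'n' :: 'w' :: rest => pvValidDirs rest
  | 's' :: 'e' :: rest => pvValidDirs rest
  | 's' :: 'w' :: rest => pvValidDirs rest
  | _ => false

def Pre_get_coordinates_of_tile (line : String) : Prop :=
  pvValidDirs (PySem.Str.strip line).toList = true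

instance (line : String) : Decidable (Pre_get_coordinates_of_tile line) := by
  unfold Pre_get_coordinates_of_tile; infer_instance

def pvWitness_get_coordinates_of_tile : String := "esenee"

def Spec_get_coordinates_of_tile (line : String) (out : Int × Int) : Prop := out = get_coordinates_of_tile_alt line
instance (line : String) (out : Int × Int) : Decidable (Spec_get_coordinates_of_tile line out) := by unfold Spec_get_coordinates_of_tile; infer_instance

-- ===== CLAIM (what is proved, stated in full; the proofs are below) =====
def Claim_equal_get_coordinates_of_tile : Prop := ∀ (line : String), Dom_get_coordinates_of_tile line → Pre_get_coordinates_of_tile line → Spec_get_coordinates_of_tile line (get_coordinates_of_tile line)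

-- ===== LEMMAS AND PROOFS =====

-- the closed-form axial→offset conversion, in omega-friendly form
lemma pvCv_eq (r : Int) :
    PySem.Int.floordiv (r - PySem.Int.mod r 2) 2 = (r - r % 2) / 2 := by
  rw [PySem.Int.mod_eq_emod_of_pos (by norm_num),
      PySem.Int.floordiv_eq_ediv_of_pos (by norm_num)]

-- dictionary facts used in the loop invariant
lemma evContains_e : pvDirRowEven.contains (String.mk ['e']) = true := by decide
lemma evContains_w : pvDirRowEven.contains (String.mk ['w']) = true := by decide
lemma evContains_n : pvDirRowEven.contains (String.mk ['n']) = false := by decide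
lemma evContains_s : pvDirRowEven.contains (String.mk ['s']) = false := by decide

-- step lemmas: one unfolding of A's loop per token
lemma goA_e (rest : List Char) (x y : Int) : pvGoA ('e'::rest) x y = pvGoA rest (x+1) y := by
  rw [pvGoA]
  simp [evContains_e, show pvDirRowEven.get? (String.mk ['e']) = some (1,0) from by decide,
    show pvDirRowOdd.get? (String.mk ['e']) = some (1,0) from by decide, ite_self]

lemma goA_w (rest : List Char) (x y : Int) : pvGoA ('w'::rest) x y = pvGoA rest (x-1) y := by
  rw [pvGoA]
  simp [evContains_w, show pvDirRowEven.get? (String.mk ['w']) = some (-1,0) from by decide,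
    show pvDirRowOdd.get? (String.mk ['w']) = some (-1,0) from by decide, ite_self, sub_eq_add_neg]

lemma goA_ne (rest : List Char) (x y : Int) :
    pvGoA ('n'::'e'::rest) x y = pvGoA rest (x + (if 2 ∣ y then 0 else 1)) (y + 1) := by
  rw [pvGoA]
  by_cases hy : (2:Int) ∣ y <;>
  simp [evContains_n, hy, show pvDirRowEven.get? (String.mk ['n','e']) = some (0,1) from by decide,
    show pvDirRowOdd.get? (String.mk ['n','e']) = some (1,1) from by decide]

lemma goA_nw (rest : List Char) (x y : Int) :
    pvGoA ('n'::'w'::rest) x y = pvGoA rest (x + (if 2 ∣ y then -1 else 0)) (y + 1) := by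
  rw [pvGoA]
  by_cases hy : (2:Int) ∣ y <;>
  simp [evContains_n, hy, show pvDirRowEven.get? (String.mk ['n','w']) = some (-1,1) from by decide,
    show pvDirRowOdd.get? (String.mk ['n','w']) = some (0,1) from by decide, sub_eq_add_neg]

lemma goA_se (rest : List Char) (x y : Int) :
    pvGoA ('s'::'e'::rest) x y = pvGoA rest (x + (if 2 ∣ y then 0 else 1)) (y - 1) := by
  rw [pvGoA]
  by_cases hy : (2:Int) ∣ y <;>
  simp [evContains_s, hy, show pvDirRowEven.get? (String.mk ['s','e']) = some (0,-1) from by decide,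
    show pvDirRowOdd.get? (String.mk ['s','e']) = some (1,-1) from by decide, sub_eq_add_neg]

lemma goA_sw (rest : List Char) (x y : Int) :
    pvGoA ('s'::'w'::rest) x y = pvGoA rest (x + (if 2 ∣ y then -1 else 0)) (y - 1) := by
  rw [pvGoA]
  by_cases hy : (2:Int) ∣ y <;>
  simp [evContains_s, hy, show pvDirRowEven.get? (String.mk ['s','w']) = some (-1,-1) from by decide,
    show pvDirRowOdd.get? (String.mk ['s','w']) = some (0,-1) from by decide, sub_eq_add_neg]

-- tokenizer unfoldings
lemma tok_e (rest : List Char) : pvTokenize ('e'::rest) = String.mk ['e'] :: pvTokenize rest := by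
  simp [pvTokenize]
lemma tok_w (rest : List Char) : pvTokenize ('w'::rest) = String.mk ['w'] :: pvTokenize rest := by
  simp [pvTokenize]
lemma tok_ne (rest : List Char) : pvTokenize ('n'::'e'::rest) = String.mk ['n','e'] :: pvTokenize rest := by
  simp [pvTokenize]
lemma tok_nw (rest : List Char) : pvTokenize ('n'::'w'::rest) = String.mk ['n','w'] :: pvTokenize rest := by
  simp [pvTokenize]
lemma tok_se (rest : List Char) : pvTokenize ('s'::'e'::rest) = String.mk ['s','e'] :: pvTokenize rest := by
  simp [pvTokenize]
lemma tok_sw (rest : List Char) : pvTokenize ('s'::'w'::rest) = String.mk ['s','w'] :: pvTokenize rest := by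
  simp [pvTokenize]

lemma pvMain (l : List Char) (h : pvValidDirs l = true) :
    ∀ (q r : Int), pvGoA l (q + PySem.Int.floordiv (r - PySem.Int.mod r 2) 2) r =
      some (q + ((pvTokenize l).map pvAxQ).sum +
              PySem.Int.floordiv ((r + ((pvTokenize l).map pvAxR).sum) -
                PySem.Int.mod (r + ((pvTokenize l).map pvAxR).sum) 2) 2,
            r + ((pvTokenize l).map pvAxR).sum) := by
  fun_induction pvValidDirs l with
  | case1 => intro q r; simp [pvGoA, pvTokenize]
  | case2 rest ih =>
    intro q r
    rw [goA_e, tok_e]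
    have H := ih h (q + 1) r
    simp only [pvCv_eq, List.map_cons, List.sum_cons,
      show pvAxQ (String.mk ['e']) = 1 from by decide,
      show pvAxR (String.mk ['e']) = 0 from by decide] at H ⊢
    rw [show q + (r - r % 2) / 2 + 1 = q + 1 + (r - r % 2) / 2 from by omega]
    rw [H]
    simp only [Option.some.injEq, Prod.mk.injEq]
    constructor <;> omega
  | case3 rest ih =>
    intro q r
    rw [goA_w, tok_w]
    have H := ih h (q + -1) r
    simp only [pvCv_eq, List.map_cons, List.sum_cons,
      show pvAxQ (String.mk ['w']) = -1 from by decide,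
      show pvAxR (String.mk ['w']) = 0 from by decide] at H ⊢
    rw [show q + (r - r % 2) / 2 - 1 = q + -1 + (r - r % 2) / 2 from by omega]
    rw [H]
    simp only [Option.some.injEq, Prod.mk.injEq]
    constructor <;> omega
  | case4 rest ih =>
    intro q r
    rw [goA_ne, tok_ne]
    have H := ih h (q + 0) (r + 1)
    simp only [pvCv_eq, List.map_cons, List.sum_cons,
      show pvAxQ (String.mk ['n','e']) = 0 from by decide,
      show pvAxR (String.mk ['n','e']) = 1 from by decide] at H ⊢
    rw [show q + (r - r % 2) / 2 + (if 2 ∣ r then (0:Int) else 1)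
          = q + 0 + (r + 1 - (r + 1) % 2) / 2 from by split_ifs with hh <;> omega]
    rw [H]
    simp only [Option.some.injEq, Prod.mk.injEq]
    constructor <;> omega
  | case5 rest ih =>
    intro q r
    rw [goA_nw, tok_nw]
    have H := ih h (q + -1) (r + 1)
    simp only [pvCv_eq, List.map_cons, List.sum_cons,
      show pvAxQ (String.mk ['n','w']) = -1 from by decide,
      show pvAxR (String.mk ['n','w']) = 1 from by decide] at H ⊢
    rw [show q + (r - r % 2) / 2 + (if 2 ∣ r then (-1:Int) else 0)
          = q + -1 + (r + 1 - (r + 1) % 2) / 2 from by split_ifs with hh <;> omega]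
    rw [H]
    simp only [Option.some.injEq, Prod.mk.injEq]
    constructor <;> omega
  | case6 rest ih =>
    intro q r
    rw [goA_se, tok_se]
    have H := ih h (q + 1) (r - 1)
    simp only [pvCv_eq, List.map_cons, List.sum_cons,
      show pvAxQ (String.mk ['s','e']) = 1 from by decide,
      show pvAxR (String.mk ['s','e']) = -1 from by decide] at H ⊢
    rw [show q + (r - r % 2) / 2 + (if 2 ∣ r then (0:Int) else 1)
          = q + 1 + (r - 1 - (r - 1) % 2) / 2 from by split_ifs with hh <;> omega]
    rw [H]
    simp only [Option.some.injEq, Prod.mk.injEq]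
    constructor <;> omega
  | case7 rest ih =>
    intro q r
    rw [goA_sw, tok_sw]
    have H := ih h (q + 0) (r - 1)
    simp only [pvCv_eq, List.map_cons, List.sum_cons,
      show pvAxQ (String.mk ['s','w']) = 0 from by decide,
      show pvAxR (String.mk ['s','w']) = -1 from by decide] at H ⊢
    rw [show q + (r - r % 2) / 2 + (if 2 ∣ r then (-1:Int) else 0)
          = q + 0 + (r - 1 - (r - 1) % 2) / 2 from by split_ifs with hh <;> omega]
    rw [H]
    simp only [Option.some.injEq, Prod.mk.injEq]
    constructor <;> omega
  | case8 =>
    exact absurd h (by simp)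

-- ===== VERDICT (by name: the statement is the Claim_ definition above) =====
theorem get_coordinates_of_tile_spec : Claim_equal_get_coordinates_of_tile := by
  intro line _ hpre
  unfold Spec_get_coordinates_of_tile get_coordinates_of_tile get_coordinates_of_tile_alt
  have := pvMain (PySem.Str.strip line).toList hpre 0 0
  simp only [show PySem.Int.mod (0:Int) 2 = 0 from by decide, sub_zero,
    show PySem.Int.floordiv (0:Int) 2 = 0 from by decide, zero_add, add_zero] at this
  rw [this]
  simp
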